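-- pv_equiv track=rewrite | github.com/SEpapoulis/MAPT | build/lib/MAPT/database/parser.py | split_newick
-- ===== SOURCE A (Python) =====
-- def split_newick(s):
--     counter = 0
--     nodedat = tuple()
--     descendants = []
--     taxid = str()
--     for i,char in enumerate(s):
--         if char == '(':
--             if counter == 0:
--                 start = i+1
--             counter +=1
--         elif char ==')':
--             counter-=1
--             if counter == 0:
--                 stop=i
--                 nodedat = (start,stop)
--         elif counter < 1 and char.isdigit():
--             taxid = taxid+char
--         elif counter < 1 and char ==',':
--             if taxid:
--                 taxid=int(taxid)
--             else:
--                 taxid=None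
--             if nodedat:
--                 descendants.append((s[nodedat[0]:nodedat[1]],taxid))
--             else:
--                 descendants.append((None,taxid))
--             taxid = str()
--             nodedat = tuple()
--     #add before exit
--     if taxid:
--         taxid=int(taxid)
--     else:
--         taxid=None
--     if nodedat:
--         descendants.append((s[nodedat[0]:nodedat[1]],taxid))
--     else:
--         descendants.append((None,taxid))
--     return(descendants)
-- ===== SOURCE B (Python) =====
-- def split_newick(s):
--     n = len(s)
--     # depth[i] = parenthesis nesting depth just before s[i]
--     depth = [0] * (n + 1)
--     for i, ch in enumerate(s):
--         depth[i + 1] = depth[i] + (ch == '(') - (ch == ')')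
--     # a position is top-level when it is not inside an open group
--     cuts = [i for i in range(n) if s[i] == ',' and depth[i] <= 0]
--     result = []
--     lo = 0
--     for hi in cuts + [n]:
--         stop = next((j for j in range(hi - 1, lo - 1, -1)
--                      if s[j] == ')' and depth[j] == 1), None)
--         if stop is None:
--             sub = None
--         else:
--             start = next((k for k in range(stop - 1, lo - 1, -1)
--                           if s[k] == '(' and depth[k] == 0), None)
--             sub = None if start is None else s[start + 1:stop]
--         digits = ''.join(s[j] for j in range(lo, hi)
--                          if s[j].isdigit() and depth[j] <= 0)
--         result.append((sub, int(digits) if digits else None))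
--         lo = hi + 1
--     return result
-- ===== Notes on version B (the rewrite author's own statement) =====
-- stated objective: alternative
-- what changed: Replaces A's fused flush-on-comma state machine by a three-step decomposition: precompute a prefix-depth table in one pass, cut the string at top-level commas found by indexing into that table, then for each segment locate the last top-level group by a backward search for its closing paren (and its matching opener) and collect the loose digits by an index filter.
import Mathlib
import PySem

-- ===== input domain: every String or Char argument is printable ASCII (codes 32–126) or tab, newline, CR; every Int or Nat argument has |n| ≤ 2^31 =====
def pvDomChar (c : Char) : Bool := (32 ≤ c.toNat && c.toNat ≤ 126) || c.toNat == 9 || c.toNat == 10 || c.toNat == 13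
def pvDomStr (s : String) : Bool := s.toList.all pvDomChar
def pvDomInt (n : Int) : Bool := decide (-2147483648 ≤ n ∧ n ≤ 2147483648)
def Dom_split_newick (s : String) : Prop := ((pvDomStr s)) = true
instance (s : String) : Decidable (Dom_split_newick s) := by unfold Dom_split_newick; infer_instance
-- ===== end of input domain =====

-- B replaces A's one-pass flush-on-comma state machine by a precomputed prefix-depth
-- table with index-based cutting and backward searches (same cost); return values
-- proved equal on every input.

-- ===== PORT A =====
-- flush: the append performed at a top-level comma and before exit.
-- taxid only ever accumulates digit chars, so Python's int(taxid) on a nonempty taxid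
-- cannot raise and equals (PySem.Int.ofChars? taxid).
def snA_flush (s : List Char) (nodedat : Option (Int × Int)) (taxid : List Char) :
    Option String × Option Int :=
  let tid : Option Int := if taxid = [] then none else PySem.Int.ofChars? taxid
  match nodedat with
  | some (a, b) => (some (String.ofList (PySem.List.slice s (some a) (some b))), tid)
  | none => (none, tid)

-- the for-loop over enumerate(s); `start` is a Python local that is always assigned
-- before it is read (a ')' can only bring counter from 1 to 0 after a '(' at counter 0),
-- so its initial value 0 is never observable.
def snA_loop (s : List Char) :
    List (Int × Char) → Int → Option (Int × Int) → List (Option String × Option Int) →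
    List Char → Int → List (Option String × Option Int)
  | [], _counter, nodedat, descendants, taxid, _start =>
      descendants ++ [snA_flush s nodedat taxid]
  | (i, c) :: rest, counter, nodedat, descendants, taxid, start =>
      if c = '(' then
        snA_loop s rest (counter + 1) nodedat descendants taxid
          (if counter = 0 then i + 1 else start)
      else if c = ')' then
        snA_loop s rest (counter - 1)
          (if counter - 1 = 0 then some (start, i) else nodedat) descendants taxid start
      else if counter < 1 ∧ PySem.Chars.isdigit c then
        snA_loop s rest counter nodedat descendants (taxid ++ [c]) start
      else if counter < 1 ∧ c = ',' then
        snA_loop s rest counter none (descendants ++ [snA_flush s nodedat taxid]) [] start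
      else
        snA_loop s rest counter nodedat descendants taxid start

def split_newick (s : String) : List (Option String × Option Int) :=
  snA_loop s.toList (PySem.List.enumerate s.toList 0) 0 none [] [] 0

-- ===== PORT B =====
-- depth[i+1] = depth[i] + (ch=='(') - (ch==')')
def snN_step (d : Int) (c : Char) : Int :=
  d + (if c = '(' then 1 else 0) - (if c = ')' then 1 else 0)

-- the prefix-depth table; depth[i] is read off with getD
def snN_dep (s : List Char) (i : Nat) : Int := (List.scanl snN_step 0 s).getD i 0

-- s[i] == ',' and depth[i] <= 0
def snN_cutP (s : List Char) (i : Nat) : Bool :=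
  s.getD i ' ' = ',' && decide (snN_dep s i ≤ 0)

def snN_stopP (s : List Char) (j : Nat) : Bool :=
  s.getD j ' ' = ')' && decide (snN_dep s j = 1)

def snN_startP (s : List Char) (k : Nat) : Bool :=
  s.getD k ' ' = '(' && decide (snN_dep s k = 0)

-- next((j for j in range(hi-1, lo-1, -1) if P j), None)
def snN_findLast (lo hi : Nat) (P : Nat → Bool) : Option Nat :=
  (List.range' lo (hi - lo)).reverse.find? P

-- ''.join(s[j] for j in range(lo, hi) if s[j].isdigit() and depth[j] <= 0)
def snN_digits (s : List Char) (lo hi : Nat) : List Char :=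
  ((List.range' lo (hi - lo)).filter
      (fun j => PySem.Chars.isdigit (s.getD j ' ') && decide (snN_dep s j ≤ 0))).map
    (fun j => s.getD j ' ')

-- one element of the result list, for the segment s[lo:hi]
def snN_emit (s : List Char) (lo hi : Nat) : Option String × Option Int :=
  let sub : Option String :=
    match snN_findLast lo hi (snN_stopP s) with
    | none => none
    | some j =>
      match snN_findLast lo j (snN_startP s) with
      | none => none   -- unreachable: a ')' at depth 1 is preceded by a '(' at depth 0
      | some k => some (String.ofList
          (PySem.List.slice s (some ((k : Int) + 1)) (some (j : Int))))
  let digits := snN_digits s lo hi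
  (sub, if digits = [] then none else PySem.Int.ofChars? digits)

-- for hi in cuts + [n]: … ; lo = hi + 1
def snN_loop (s : List Char) : Nat → List Nat → List (Option String × Option Int)
  | _lo, [] => []
  | lo, hi :: rest => snN_emit s lo hi :: snN_loop s (hi + 1) rest

def split_newick_alt (s : String) : List (Option String × Option Int) :=
  snN_loop s.toList 0
    (((List.range s.toList.length).filter (snN_cutP s.toList)) ++ [s.toList.length])

-- ===== PRECONDITION & SPEC =====
def Spec_split_newick (s : String) (out : List (Option String × Option Int)) : Prop := out = split_newick_alt s
instance (s : String) (out : List (Option String × Option Int)) : Decidable (Spec_split_newick s out) := by unfold Spec_split_newick; infer_instance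

-- ===== CLAIM (what is proved, stated in full; the proofs are below) =====
def Claim_equal_split_newick : Prop := ∀ (s : String), Dom_split_newick s → Spec_split_newick s (split_newick s)

-- ===== LEMMAS AND PROOFS =====

-- proof-side spec state machine (two-phase view of A): step of a per-segment scan,
-- state (depth, group, buf, digits)
def snB_step (st : Int × Option (List Char) × List Char × List Char) (c : Char) :
    Int × Option (List Char) × List Char × List Char :=
  let (depth, group, buf, digits) := st
  if c = '(' then
    (depth + 1, group, if depth = 0 then [] else buf ++ [c], digits)
  else if c = ')' then
    if depth - 1 = 0 then (depth - 1, some buf, buf, digits)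
    else if 1 ≤ depth - 1 then (depth - 1, group, buf ++ [c], digits)
    else (depth - 1, group, buf, digits)
  else if 1 ≤ depth then (depth, group, buf ++ [c], digits)
  else if PySem.Chars.isdigit c then (depth, group, buf, digits ++ [c])
  else (depth, group, buf, digits)

-- per segment: scan, then build the output pair
def snB_proc (seg : List Char × Int) : Option String × Option Int :=
  let st := List.foldl snB_step (seg.2, none, [], []) seg.1
  (st.2.1.map String.ofList, if st.2.2.2 = [] then none else PySem.Int.ofChars? st.2.2.2)

-- proof-side: flush of the spec machine's mid-segment state
def snB_out (g : Option (List Char)) (dg : List Char) : Option String × Option Int :=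
  (g.map String.ofList, if dg = [] then none else PySem.Int.ofChars? dg)

-- proof-side: remaining output of the spec machine, continuing the current segment
def snB_rest : List Char → Int → Option (List Char) → List Char → List Char →
    List (Option String × Option Int)
  | [], _d, g, _buf, dg => [snB_out g dg]
  | c :: rest, d, g, buf, dg =>
      if c = ',' ∧ d < 1 then
        snB_out g dg :: snB_rest rest d none [] []
      else
        snB_rest rest (snB_step (d, g, buf, dg) c).1 (snB_step (d, g, buf, dg) c).2.1
          (snB_step (d, g, buf, dg) c).2.2.1 (snB_step (d, g, buf, dg) c).2.2.2

-- proof-side: segmentation with starting depths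
def snB_segs : List Char → Int → List Char → Int → List (List Char × Int)
  | [], _depth, cur, d0 => [(cur, d0)]
  | c :: rest, depth, cur, d0 =>
      if c = ',' ∧ depth < 1 then
        (cur, d0) :: snB_segs rest depth [] depth
      else
        snB_segs rest
          (if c = '(' then depth + 1 else if c = ')' then depth - 1 else depth)
          (cur ++ [c]) d0

-- invariant tying A's nodedat slice indices to the spec machine's recorded group
def NdInv (p : List Char) (nd : Option (Int × Int)) (G : Option (List Char)) : Prop :=
  ∀ a b, nd = some (a, b) → ∃ na nb : Nat, a = (na : Int) ∧ b = (nb : Int) ∧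
    na ≤ nb ∧ nb ≤ p.length ∧ G = some ((p.drop na).take (nb - na))

-- invariant tying A's start index to the spec machine's open-group buffer
def BufInv (p : List Char) (counter : Int) (buf : List Char) (start : Int) : Prop :=
  1 ≤ counter → ∃ st : Nat, start = (st : Int) ∧ st ≤ p.length ∧ buf = p.drop st

theorem take_drop_snoc (p : List Char) (c : Char) (na nb : Nat) (h : nb ≤ p.length) :
    ((p ++ [c]).drop na).take (nb - na) = (p.drop na).take (nb - na) := by
  by_cases hle : na ≤ nb
  · rw [List.drop_append_of_le_length (by omega),
      List.take_append_of_le_length (by rw [List.length_drop]; omega)]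
  · have h0 : nb - na = 0 := by omega
    simp [h0]

theorem NdInv_mono (p : List Char) (c : Char) (nd : Option (Int × Int))
    (G : Option (List Char)) (h : NdInv p nd G) : NdInv (p ++ [c]) nd G := by
  intro a b hab
  obtain ⟨na, nb, h1, h2, h3, h4, h5⟩ := h a b hab
  exact ⟨na, nb, h1, h2, h3, by simp; omega, by rw [h5, take_drop_snoc p c na nb h4]⟩

theorem BufInv_snoc (p : List Char) (c : Char) (counter : Int) (buf : List Char)
    (start : Int) (h : BufInv p counter buf start) (hc : 1 ≤ counter) (counter' : Int) :
    BufInv (p ++ [c]) counter' (buf ++ [c]) start := by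
  intro _
  obtain ⟨st, h1, h2, h3⟩ := h hc
  exact ⟨st, h1, by simp; omega, by rw [h3, List.drop_append_of_le_length h2]⟩

theorem BufInv_vac (p : List Char) (counter : Int) (buf : List Char) (start : Int)
    (hc : counter ≤ 0) : BufInv p counter buf start := by
  intro h; omega

theorem flush_eq (cs p : List Char) (nd : Option (Int × Int)) (G : Option (List Char))
    (taxid : List Char) (h : NdInv p nd G) (h0 : nd = none → G = none) :
    snA_flush (p ++ cs) nd taxid = snB_out G taxid := by
  cases nd with
  | none => simp [snA_flush, snB_out, h0 rfl]
  | some ab =>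
    obtain ⟨a, b⟩ := ab
    obtain ⟨na, nb, ha, hb, h3, h4, h5⟩ := h a b rfl
    subst ha hb
    simp only [snA_flush, snB_out, h5, PySem.List.slice_natCast, Option.map_some]
    rw [List.drop_append_of_le_length (by omega),
      List.take_append_of_le_length (by rw [List.length_drop]; omega)]

theorem snA_loop_acc (s : List Char) (e : List (Int × Char)) (counter : Int)
    (nd : Option (Int × Int)) (d : List (Option String × Option Int))
    (t : List Char) (st : Int) :
    snA_loop s e counter nd d t st = d ++ snA_loop s e counter nd [] t st := by
  induction e generalizing counter nd d t st with
  | nil => simp [snA_loop]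
  | cons ic rest ih =>
    obtain ⟨i, c⟩ := ic
    simp only [snA_loop]
    split_ifs <;>
      first
        | exact ih ..
        | ((conv_rhs => rw [ih]); (conv_lhs => rw [ih]); simp)

-- reductions of snB_step under a known character class
theorem snB_step_open (d : Int) (g : Option (List Char)) (buf dg : List Char) (c : Char)
    (h : c = '(') : snB_step (d, g, buf, dg) c
      = (d + 1, g, if d = 0 then [] else buf ++ [c], dg) := by
  subst h; simp [snB_step]

theorem snB_step_close (d : Int) (g : Option (List Char)) (buf dg : List Char) (c : Char)
    (h : c = ')') : snB_step (d, g, buf, dg) c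
      = if d - 1 = 0 then (d - 1, some buf, buf, dg)
        else if 1 ≤ d - 1 then (d - 1, g, buf ++ [c], dg)
        else (d - 1, g, buf, dg) := by
  subst h; simp [snB_step]

theorem snB_step_other (d : Int) (g : Option (List Char)) (buf dg : List Char) (c : Char)
    (h1 : ¬ c = '(') (h2 : ¬ c = ')') : snB_step (d, g, buf, dg) c
      = if 1 ≤ d then (d, g, buf ++ [c], dg)
        else if PySem.Chars.isdigit c then (d, g, buf, dg ++ [c])
        else (d, g, buf, dg) := by
  simp [snB_step, h1, h2]

-- MAIN (A side): A's loop from a mid-segment state equals the spec machine's remaining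
-- output, given the state correspondence.
theorem snA_eq_rest (cs : List Char) : ∀ (p : List Char) (counter : Int)
    (nd : Option (Int × Int)) (buf taxid : List Char) (start : Int)
    (G : Option (List Char)), NdInv p nd G → (nd = none → G = none) →
    BufInv p counter buf start →
    snA_loop (p ++ cs) (PySem.List.enumerate cs (p.length : Int)) counter nd [] taxid start
      = snB_rest cs counter G buf taxid := by
  induction cs with
  | nil =>
    intro p counter nd buf taxid start G hnd hnone _
    simp only [PySem.List.enumerate_nil, snA_loop, snB_rest, List.nil_append]
    rw [flush_eq [] p nd G taxid hnd hnone]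
  | cons c cs ih =>
    intro p counter nd buf taxid start G hnd hnone hbuf
    rw [PySem.List.enumerate_cons]
    have hs : p ++ c :: cs = (p ++ [c]) ++ cs := by simp
    have hidx : (p.length : Int) + 1 = (((p ++ [c]).length : Nat) : Int) := by simp
    simp only [snA_loop, snB_rest]
    by_cases h1 : c = '('
    · have hnsp : ¬ (c = ',' ∧ counter < 1) := by
        intro h; rw [h1] at h; exact absurd h.1 (by decide)
      rw [if_pos h1, if_neg hnsp, snB_step_open counter G buf taxid c h1, hs, hidx]
      by_cases h0 : counter = 0
      · rw [if_pos h0, if_pos h0]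
        apply ih (p ++ [c]) (counter + 1) nd [] taxid _ G (NdInv_mono _ _ _ _ hnd) hnone
        intro _
        refine ⟨p.length + 1, by simp, by simp, by simp⟩
      · rw [if_neg h0, if_neg h0]
        apply ih (p ++ [c]) (counter + 1) nd (buf ++ [c]) taxid start G
          (NdInv_mono _ _ _ _ hnd) hnone
        by_cases hge : 1 ≤ counter
        · exact BufInv_snoc p c counter buf start hbuf hge _
        · exact BufInv_vac _ _ _ _ (by omega)
    · by_cases h2 : c = ')'
      · have hnsp : ¬ (c = ',' ∧ counter < 1) := by
          intro h; rw [h2] at h; exact absurd h.1 (by decide)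
        rw [if_neg h1, if_pos h2, if_neg hnsp,
          snB_step_close counter G buf taxid c h2, hs, hidx]
        by_cases hz : counter - 1 = 0
        · rw [if_pos hz, if_pos hz]
          obtain ⟨st, hstart, hstle, hbufeq⟩ := hbuf (by omega)
          subst hstart
          apply ih (p ++ [c]) (counter - 1) _ buf taxid _ (some buf) _
            (by intro h; cases h) (BufInv_vac _ _ _ _ (by omega))
          intro a b hab
          have hp := Option.some.inj hab
          refine ⟨st, p.length, (congrArg Prod.fst hp).symm,
            (congrArg Prod.snd hp).symm, hstle, by simp, ?_⟩
          rw [take_drop_snoc p c st p.length le_rfl, hbufeq,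
            List.take_of_length_le (by rw [List.length_drop])]
        · rw [if_neg hz, if_neg hz]
          by_cases hge : 1 ≤ counter - 1
          · rw [if_pos hge]
            apply ih (p ++ [c]) (counter - 1) nd (buf ++ [c]) taxid start G
              (NdInv_mono _ _ _ _ hnd) hnone
            exact BufInv_snoc p c counter buf start hbuf (by omega) _
          · rw [if_neg hge]
            exact ih (p ++ [c]) (counter - 1) nd buf taxid start G
              (NdInv_mono _ _ _ _ hnd) hnone (BufInv_vac _ _ _ _ (by omega))
      · by_cases hcm : c = ','
        · by_cases hlt : counter < 1
          · have hnd2 : ¬ (counter < 1 ∧ PySem.Chars.isdigit c = true) := by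
              intro h; rw [hcm] at h; exact absurd h.2 (by decide)
            have hA : counter < 1 ∧ c = ',' := ⟨hlt, hcm⟩
            have hB : c = ',' ∧ counter < 1 := ⟨hcm, hlt⟩
            rw [if_neg h1, if_neg h2, if_neg hnd2, if_pos hA, if_pos hB, snA_loop_acc,
              flush_eq (c :: cs) p nd G taxid hnd hnone, hs, hidx,
              ih (p ++ [c]) counter none [] [] start none
                (by intro a b h; cases h) (fun _ => rfl)
                (BufInv_vac _ _ _ _ (by omega))]
            simp
          · have hnd2 : ¬ (counter < 1 ∧ PySem.Chars.isdigit c = true) := fun h => hlt h.1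
            have hA : ¬ (counter < 1 ∧ c = ',') := fun h => hlt h.1
            have hB : ¬ (c = ',' ∧ counter < 1) := fun h => hlt h.2
            have hge : (1 : Int) ≤ counter := by omega
            rw [if_neg h1, if_neg h2, if_neg hnd2, if_neg hA, if_neg hB,
              snB_step_other counter G buf taxid c h1 h2, if_pos hge, hs, hidx]
            exact ih (p ++ [c]) counter nd (buf ++ [c]) taxid start G
              (NdInv_mono _ _ _ _ hnd) hnone
              (BufInv_snoc p c counter buf start hbuf hge _)
        · have hB : ¬ (c = ',' ∧ counter < 1) := fun h => hcm h.1
          rw [if_neg h1, if_neg h2, if_neg hB,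
            snB_step_other counter G buf taxid c h1 h2]
          by_cases hlt : counter < 1
          · have hgen : ¬ (1 : Int) ≤ counter := by omega
            rw [if_neg hgen]
            by_cases hdig : PySem.Chars.isdigit c = true
            · have hA : counter < 1 ∧ PySem.Chars.isdigit c = true := ⟨hlt, hdig⟩
              rw [if_pos hA, if_pos hdig, hs, hidx]
              exact ih (p ++ [c]) counter nd buf (taxid ++ [c]) start G
                (NdInv_mono _ _ _ _ hnd) hnone (BufInv_vac _ _ _ _ (by omega))
            · have hA : ¬ (counter < 1 ∧ PySem.Chars.isdigit c = true) := fun h => hdig h.2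
              have hA2 : ¬ (counter < 1 ∧ c = ',') := fun h => hcm h.2
              rw [if_neg hA, if_neg hA2, if_neg hdig, hs, hidx]
              exact ih (p ++ [c]) counter nd buf taxid start G
                (NdInv_mono _ _ _ _ hnd) hnone (BufInv_vac _ _ _ _ (by omega))
          · have hA : ¬ (counter < 1 ∧ PySem.Chars.isdigit c = true) := fun h => hlt h.1
            have hA2 : ¬ (counter < 1 ∧ c = ',') := fun h => hlt h.1
            have hge : (1 : Int) ≤ counter := by omega
            rw [if_neg hA, if_neg hA2, if_pos hge, hs, hidx]
            exact ih (p ++ [c]) counter nd (buf ++ [c]) taxid start G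
              (NdInv_mono _ _ _ _ hnd) hnone
              (BufInv_snoc p c counter buf start hbuf hge _)

theorem snB_step_fst (d : Int) (g : Option (List Char)) (buf dg : List Char) (c : Char) :
    (snB_step (d, g, buf, dg) c).1
      = if c = '(' then d + 1 else if c = ')' then d - 1 else d := by
  simp only [snB_step]
  split_ifs <;> rfl

theorem rest_eq_segs (cs : List Char) : ∀ (cur : List Char) (d0 : Int)
    (st : Int × Option (List Char) × List Char × List Char),
    st = List.foldl snB_step (d0, none, [], []) cur →
    snB_rest cs st.1 st.2.1 st.2.2.1 st.2.2.2
      = (snB_segs cs st.1 cur d0).map snB_proc := by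
  induction cs with
  | nil =>
    intro cur d0 st hst
    simp [snB_rest, snB_segs, snB_proc, snB_out, hst]
  | cons c cs ih =>
    intro cur d0 st hst
    obtain ⟨d, g, buf, dg⟩ := st
    simp only [snB_rest, snB_segs]
    by_cases hsplit : c = ',' ∧ d < 1
    · rw [if_pos hsplit, if_pos hsplit, List.map_cons]
      have hproc : snB_proc (cur, d0) = snB_out g dg := by
        simp [snB_proc, snB_out, ← hst]
      rw [hproc]
      have := ih [] d (d, none, [], []) rfl
      simp only at this
      rw [this]
    · rw [if_neg hsplit, if_neg hsplit]
      have hfold : snB_step (d, g, buf, dg) c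
          = List.foldl snB_step (d0, none, [], []) (cur ++ [c]) := by
        rw [List.foldl_concat, ← hst]
      have := ih (cur ++ [c]) d0 (snB_step (d, g, buf, dg) c) hfold
      rw [this, snB_step_fst]

-- ===== new bridge: two-phase spec machine = prefix-depth / index formulation =====

-- s[a:b] as a plain drop/take
def snP_sub (s : List Char) (a b : Nat) : List Char := (s.drop a).take (b - a)

-- group of s[lo:hi] in index form
def snP_grp (s : List Char) (lo hi : Nat) : Option (List Char) :=
  match snN_findLast lo hi (snN_stopP s) with
  | none => none
  | some j =>
    match snN_findLast lo j (snN_startP s) with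
    | none => none
    | some k => some (snP_sub s (k + 1) j)

theorem snP_sub_self (s : List Char) (a : Nat) : snP_sub s a a = [] := by
  simp [snP_sub]

theorem snP_sub_snoc (s : List Char) (a b : Nat) (h1 : a ≤ b) (h2 : b < s.length) :
    snP_sub s a (b + 1) = snP_sub s a b ++ [s.getD b ' '] := by
  unfold snP_sub
  have hba : b + 1 - a = (b - a) + 1 := by omega
  rw [hba, List.take_add_one, List.getElem?_drop]
  have hab : a + (b - a) = b := by omega
  rw [hab, List.getElem?_eq_getElem h2, List.getD_eq_getElem s ' ' h2]
  rfl

theorem snN_dep_zero (s : List Char) : snN_dep s 0 = 0 := by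
  cases s <;> simp [snN_dep, List.scanl]

theorem snN_dep_succ (s : List Char) (i : Nat) (h : i < s.length) :
    snN_dep s (i + 1) = snN_step (snN_dep s i) (s.getD i ' ') := by
  have head : ∀ (l : List Char) (b : Int), (List.scanl snN_step b l).getD 0 0 = b := by
    intro l b; cases l <;> simp [List.scanl]
  have main : ∀ (l : List Char) (b : Int) (i : Nat), i < l.length →
      (List.scanl snN_step b l).getD (i + 1) 0
        = snN_step ((List.scanl snN_step b l).getD i 0) (l.getD i ' ') := by
    intro l
    induction l with
    | nil => intro b i h; simp at h
    | cons a t ih =>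
      intro b i h
      cases i with
      | zero =>
        rw [List.scanl_cons]
        simp only [List.getD_cons_succ, List.getD_cons_zero]
        rw [head t (snN_step b a)]
      | succ i =>
        rw [List.scanl_cons]
        simpa using ih (snN_step b a) i (by simpa using h)
  exact main s 0 i h

theorem snN_findLast_self (lo : Nat) (P : Nat → Bool) : snN_findLast lo lo P = none := by
  simp [snN_findLast]

theorem snN_findLast_succ (lo hi : Nat) (P : Nat → Bool) (h : lo ≤ hi) :
    snN_findLast lo (hi + 1) P = if P hi then some hi else snN_findLast lo hi P := by
  unfold snN_findLast
  have hn : hi + 1 - lo = (hi - lo) + 1 := by omega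
  have hlo : lo + (hi - lo) = hi := by omega
  rw [hn, List.range'_1_concat, hlo, List.reverse_append]
  by_cases hP : P hi = true <;> simp [hP]

theorem snN_findLast_some (lo hi st : Nat) (P : Nat → Bool)
    (h : snN_findLast lo hi P = some st) : lo ≤ st ∧ st < hi ∧ P st = true := by
  have hP := List.find?_some h
  have hm := List.mem_of_find?_eq_some h
  rw [List.mem_reverse, List.mem_range'_1] at hm
  exact ⟨hm.1, by omega, hP⟩

theorem snN_digits_self (s : List Char) (lo : Nat) : snN_digits s lo lo = [] := by
  simp [snN_digits]

theorem snN_digits_succ (s : List Char) (lo hi : Nat) (h : lo ≤ hi) :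
    snN_digits s lo (hi + 1)
      = snN_digits s lo hi ++
        (if PySem.Chars.isdigit (s.getD hi ' ') && decide (snN_dep s hi ≤ 0)
         then [s.getD hi ' '] else []) := by
  unfold snN_digits
  have hn : hi + 1 - lo = (hi - lo) + 1 := by omega
  have hlo : lo + (hi - lo) = hi := by omega
  rw [hn, List.range'_1_concat, hlo, List.filter_append, List.map_append]
  by_cases h1 : PySem.Chars.isdigit (s[hi]?.getD ' ') = true <;>
    by_cases h2 : snN_dep s hi ≤ 0 <;>
      simp [List.getD, h1, h2]


theorem snP_grp_self (s : List Char) (lo : Nat) : snP_grp s lo lo = none := by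
  simp [snP_grp, snN_findLast_self]

theorem snP_grp_succ_notstop (s : List Char) (lo hi : Nat) (h : lo ≤ hi)
    (hst : snN_stopP s hi = false) : snP_grp s lo (hi + 1) = snP_grp s lo hi := by
  unfold snP_grp
  rw [snN_findLast_succ lo hi _ h, hst]
  simp

theorem snN_digits_succ_skip (s : List Char) (lo hi : Nat) (h : lo ≤ hi)
    (hc : (PySem.Chars.isdigit (s.getD hi ' ') && decide (snN_dep s hi ≤ 0)) = false) :
    snN_digits s lo (hi + 1) = snN_digits s lo hi := by
  rw [snN_digits_succ s lo hi h, hc]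
  simp

-- FOLD invariant: scanning s[lo:hi] from depth[lo] computes depth[hi], the index-form
-- group and digits; when the depth is positive the buffer is the content of the last
-- top-level '(' so far.
theorem snFOLD (s : List Char) (lo : Nat) (h0 : snN_dep s lo ≤ 0) :
    ∀ hi, lo ≤ hi → hi ≤ s.length →
    ∃ buf, List.foldl snB_step (snN_dep s lo, none, [], []) (snP_sub s lo hi)
        = (snN_dep s hi, snP_grp s lo hi, buf, snN_digits s lo hi)
      ∧ (1 ≤ snN_dep s hi → ∃ st, snN_findLast lo hi (snN_startP s) = some st
          ∧ buf = snP_sub s (st + 1) hi) := by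
  intro hi hle
  induction hi, hle using Nat.le_induction with
  | base =>
    intro _
    refine ⟨[], ?_, fun h => absurd h (by omega)⟩
    rw [snP_sub_self, snP_grp_self, snN_digits_self]
    rfl
  | succ hi hle ih =>
    intro hlen
    have hl : hi < s.length := by omega
    obtain ⟨buf, hfold, hbr⟩ := ih (by omega)
    rw [snP_sub_snoc s lo hi hle hl, List.foldl_concat, hfold]
    have hdep := snN_dep_succ s hi hl
    by_cases hc1 : s[hi]?.getD ' ' = '('
    · have hcg1 : s.getD hi ' ' = '(' := hc1
      have hstop : snN_stopP s hi = false := by simp [snN_stopP, hc1]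
      have hdig : (PySem.Chars.isdigit (s.getD hi ' ')
          && decide (snN_dep s hi ≤ 0)) = false := by
        rw [hcg1]; simp [show PySem.Chars.isdigit '(' = false from by decide]
      have hdep' : snN_dep s (hi + 1) = snN_dep s hi + 1 := by
        rw [hdep, hcg1]; simp [snN_step]
      rw [snB_step_open _ _ _ _ _ hcg1, snP_grp_succ_notstop s lo hi hle hstop,
        snN_digits_succ_skip s lo hi hle hdig]
      by_cases hd0 : snN_dep s hi = 0
      · refine ⟨[], by rw [if_pos hd0, hdep'], ?_⟩
        intro _
        have hsP : snN_startP s hi = true := by simp [snN_startP, hc1, hd0]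
        refine ⟨hi, ?_, (snP_sub_self s (hi + 1)).symm⟩
        rw [snN_findLast_succ lo hi _ hle, hsP]
        rfl
      · refine ⟨buf ++ [s.getD hi ' '], by rw [if_neg hd0, hdep'], ?_⟩
        intro hpos
        have hd1 : 1 ≤ snN_dep s hi := by omega
        obtain ⟨st, hfl, hbe⟩ := hbr hd1
        have hstlt := (snN_findLast_some lo hi st _ hfl).2.1
        have hsP : snN_startP s hi = false := by simp [snN_startP, hd0]
        refine ⟨st, ?_, ?_⟩
        · rw [snN_findLast_succ lo hi _ hle, hsP]
          simpa using hfl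
        · rw [hbe, snP_sub_snoc s (st + 1) hi (by omega) hl]
    · by_cases hc2 : s[hi]?.getD ' ' = ')'
      · have hcg2 : s.getD hi ' ' = ')' := hc2
        have hdig : (PySem.Chars.isdigit (s.getD hi ' ')
            && decide (snN_dep s hi ≤ 0)) = false := by
          rw [hcg2]; simp [show PySem.Chars.isdigit ')' = false from by decide]
        have hdep' : snN_dep s (hi + 1) = snN_dep s hi - 1 := by
          rw [hdep, hcg2]; simp [snN_step]
        have hsP : snN_startP s hi = false := by simp [snN_startP, hc2]
        rw [snB_step_close _ _ _ _ _ hcg2, snN_digits_succ_skip s lo hi hle hdig]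
        by_cases hz : snN_dep s hi - 1 = 0
        · obtain ⟨st, hfl, hbe⟩ := hbr (by omega)
          have hstop : snN_stopP s hi = true := by
            simp [snN_stopP, hc2]; omega
          have hgrp : snP_grp s lo (hi + 1) = some buf := by
            unfold snP_grp
            rw [snN_findLast_succ lo hi _ hle, hstop]
            simp only [if_pos]
            rw [hfl, hbe]
          refine ⟨buf, ?_, fun h => absurd h (by omega)⟩
          rw [if_pos hz, hdep', hgrp]
        · have hstop : snN_stopP s hi = false := by
            simp [snN_stopP]; intro _; omega
          rw [if_neg hz, snP_grp_succ_notstop s lo hi hle hstop]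
          by_cases hge : 1 ≤ snN_dep s hi - 1
          · obtain ⟨st, hfl, hbe⟩ := hbr (by omega)
            have hstlt := (snN_findLast_some lo hi st _ hfl).2.1
            refine ⟨buf ++ [s.getD hi ' '], by rw [if_pos hge, hdep'], ?_⟩
            intro _
            refine ⟨st, ?_, ?_⟩
            · rw [snN_findLast_succ lo hi _ hle, hsP]
              simpa using hfl
            · rw [hbe, snP_sub_snoc s (st + 1) hi (by omega) hl]
          · refine ⟨buf, by rw [if_neg hge, hdep'], ?_⟩
            intro h
            rw [hdep'] at h
            omega
      · have hcg1n : ¬ s.getD hi ' ' = '(' := hc1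
        have hcg2n : ¬ s.getD hi ' ' = ')' := hc2
        have hstop : snN_stopP s hi = false := by simp [snN_stopP, hc2]
        have hsP : snN_startP s hi = false := by simp [snN_startP, hc1]
        have hdep' : snN_dep s (hi + 1) = snN_dep s hi := by
          rw [hdep]; simp [snN_step, hc1, hc2]
        rw [snB_step_other _ _ _ _ _ hcg1n hcg2n,
          snP_grp_succ_notstop s lo hi hle hstop]
        by_cases hge : 1 ≤ snN_dep s hi
        · obtain ⟨st, hfl, hbe⟩ := hbr hge
          have hstlt := (snN_findLast_some lo hi st _ hfl).2.1
          have hdig : (PySem.Chars.isdigit (s.getD hi ' ')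
              && decide (snN_dep s hi ≤ 0)) = false := by
            simp [show ¬ snN_dep s hi ≤ 0 from by omega]
          rw [snN_digits_succ_skip s lo hi hle hdig]
          refine ⟨buf ++ [s.getD hi ' '], by rw [if_pos hge, hdep'], ?_⟩
          intro _
          refine ⟨st, ?_, ?_⟩
          · rw [snN_findLast_succ lo hi _ hle, hsP]
            simpa using hfl
          · rw [hbe, snP_sub_snoc s (st + 1) hi (by omega) hl]
        · rw [if_neg hge]
          by_cases hdig : PySem.Chars.isdigit (s.getD hi ' ') = true
          · have hcond : (PySem.Chars.isdigit (s.getD hi ' ')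
                && decide (snN_dep s hi ≤ 0)) = true := by
              rw [hdig, Bool.true_and]
              simp only [decide_eq_true_eq]
              omega
            refine ⟨buf, ?_, fun h => absurd h (by omega)⟩
            rw [if_pos hdig, hdep', snN_digits_succ s lo hi hle, hcond]
            rfl
          · have hcond : (PySem.Chars.isdigit (s.getD hi ' ')
                && decide (snN_dep s hi ≤ 0)) = false := by
              rw [eq_false_of_ne_true hdig, Bool.false_and]
            refine ⟨buf, ?_, fun h => absurd h (by omega)⟩
            rw [if_neg hdig, hdep', snN_digits_succ_skip s lo hi hle hcond]

-- per segment: the spec machine's output pair equals the index-form one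
theorem snPERSEG (s : List Char) (lo hi : Nat) (h0 : snN_dep s lo ≤ 0)
    (h1 : lo ≤ hi) (h2 : hi ≤ s.length) :
    snB_proc (snP_sub s lo hi, snN_dep s lo) = snN_emit s lo hi := by
  obtain ⟨buf, hfold, -⟩ := snFOLD s lo h0 hi h1 h2
  unfold snB_proc
  simp only [hfold]
  unfold snN_emit
  congr 1
  unfold snP_grp
  cases hJ : snN_findLast lo hi (snN_stopP s) with
  | none => simp
  | some j =>
    cases hK : snN_findLast lo j (snN_startP s) with
    | none => simp [hK]
    | some k =>
      simp only [hK, Option.map_some]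
      have hcast : ((k : Int) + 1) = (((k + 1 : Nat) : Nat) : Int) := by push_cast; ring
      rw [hcast, PySem.List.slice_natCast]
      simp [snP_sub]

-- segmentation: the spec machine's segment list, processed, equals B's cut-driven loop
theorem snSEGMAP (s : List Char) : ∀ (cs : List Char) (i m : Nat), cs = s.drop i →
    m ≤ i → i ≤ s.length → snN_dep s m ≤ 0 →
    (snB_segs cs (snN_dep s i) (snP_sub s m i) (snN_dep s m)).map snB_proc
      = snN_loop s m ((List.range' i (s.length - i)).filter (snN_cutP s) ++ [s.length]) := by
  intro cs
  induction cs with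
  | nil =>
    intro i m hcs hmi hin hdm
    have hin' : s.length ≤ i := List.drop_eq_nil_iff.mp hcs.symm
    have hieq : i = s.length := by omega
    subst hieq
    simp only [Nat.sub_self, List.range'_zero, List.filter_nil, List.nil_append,
      snB_segs, List.map_cons, List.map_nil]
    rw [snPERSEG s m s.length hdm (by omega) (le_refl _)]
    rfl
  | cons c cs ih =>
    intro i m hcs hmi hin hdm
    have hil : i < s.length := by
      by_contra hge
      rw [List.drop_eq_nil_of_le (by omega)] at hcs
      cases hcs
    have hdrop := List.drop_eq_getElem_cons hil
    rw [hdrop] at hcs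
    have hc : c = s.getD i ' ' := by
      rw [List.getD_eq_getElem s ' ' hil]
      exact (List.cons.injEq _ _ _ _ ▸ hcs).1
    have hcs' : cs = s.drop (i + 1) := (List.cons.injEq _ _ _ _ ▸ hcs).2
    have hdep := snN_dep_succ s i hil
    have hrng : List.range' i (s.length - i)
        = i :: List.range' (i + 1) (s.length - (i + 1)) := by
      have h1 : s.length - i = (s.length - (i + 1)) + 1 := by omega
      rw [h1, List.range'_succ]
    simp only [snB_segs]
    by_cases hcut : c = ',' ∧ snN_dep s i < 1
    · have hcP : snN_cutP s i = true := by
        simp only [snN_cutP, Bool.and_eq_true, decide_eq_true_eq]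
        exact ⟨by rw [← hc]; exact hcut.1, by omega⟩
      rw [if_pos hcut, List.map_cons, hrng, List.filter_cons_of_pos hcP]
      have hdep1 : snN_dep s (i + 1) = snN_dep s i := by
        rw [hdep, ← hc, hcut.1]
        simp [snN_step]
      have htail := ih (i + 1) (i + 1) hcs' (le_refl _) (by omega)
        (by rw [hdep1]; omega)
      rw [hdep1, snP_sub_self] at htail
      simp only [List.cons_append, snN_loop]
      rw [htail, snPERSEG s m i hdm hmi (by omega)]
    · have hcP : snN_cutP s i = false := by
        simp only [snN_cutP]
        by_cases hcc : s.getD i ' ' = ','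
        · have : ¬ snN_dep s i < 1 := fun hlt => hcut ⟨by rw [hc]; exact hcc, hlt⟩
          simp only [List.getD] at hcc
          simp [hcc]
          omega
        · simp only [List.getD] at hcc
          simp [hcc]
      rw [if_neg hcut, hrng, List.filter_cons_of_neg (by simp [hcP])]
      have hstep : (if c = '(' then snN_dep s i + 1
          else if c = ')' then snN_dep s i - 1 else snN_dep s i) = snN_dep s (i + 1) := by
        rw [hdep, ← hc]
        by_cases h1 : c = '('
        · simp [snN_step, h1]
        · by_cases h2 : c = ')' <;> simp [snN_step, h1, h2]
      have hsub : snP_sub s m i ++ [c] = snP_sub s m (i + 1) := by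
        rw [hc, (snP_sub_snoc s m i hmi hil)]
      rw [hstep, hsub]
      exact ih (i + 1) m hcs' (by omega) (by omega) hdm

-- ===== VERDICT (by name: the statement is the Claim_ definition above) =====
theorem split_newick_spec : Claim_equal_split_newick := by
  intro s _
  show split_newick s = split_newick_alt s
  unfold split_newick split_newick_alt
  have h1 := snA_eq_rest s.toList [] 0 none [] [] 0 none
    (by intro a b h; cases h) (fun _ => rfl) (BufInv_vac _ _ _ _ (by omega))
  simp only [List.nil_append, List.length_nil, Nat.cast_zero] at h1
  rw [h1, rest_eq_segs s.toList [] 0 (0, none, [], []) rfl]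
  have h2 := snSEGMAP s.toList s.toList 0 0 rfl (le_refl 0) (Nat.zero_le _) (by
    rw [snN_dep_zero])
  rw [snN_dep_zero, snP_sub_self] at h2
  rw [h2, List.range_eq_range']
  simp
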